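-- pv_equiv track=rewrite | github.com/totoLab/code-ingegneria-informatica | fondamenti1/simulazioni_esame/17022021/es2.py | confronto_e_scambio_ascii
-- ===== SOURCE A (Python) =====
-- def confronto_e_scambio_ascii(lista, el1, el2):
-- 	max_loops = min(len(lista[el1]), len(lista[el2]))
-- 	for x in range(max_loops):
-- 		letter = lista[el1][x]
-- 		previous_letter = lista[el2][x]
-- 		if previous_letter != letter:
-- 			if ord(previous_letter) > ord(letter):
-- 				t = lista[el1]
-- 				lista[el1] = lista[el2]
-- 				lista[el2] = t
--
-- 	return lista
-- ===== SOURCE B (Python) =====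
-- def confronto_e_scambio_ascii(lista, el1, el2):
--     s1 = lista[el1]
--     s2 = lista[el2]
--     # The decision made at the last differing position overwrites all earlier
--     # toggles, so scan backwards and stop at the first differing character.
--     for x in range(min(len(s1), len(s2)) - 1, -1, -1):
--         if s1[x] != s2[x]:
--             if ord(s2[x]) > ord(s1[x]):
--                 lista[el1] = s2
--                 lista[el2] = s1
--             return lista
--     return lista
-- ===== Notes on version B (the rewrite author's own statement) =====
-- stated objective: alternative
-- what changed: B replaces A's forward loop of repeated in-place swaps by a single backward scan with early exit: since at every differing position the decision (swap orientation = s2[x] > s1[x]) overwrites all earlier toggles, the last differing position alone determines the outcome, so B stops at the first differing character found from the right and swaps at most once.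
import Mathlib
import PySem

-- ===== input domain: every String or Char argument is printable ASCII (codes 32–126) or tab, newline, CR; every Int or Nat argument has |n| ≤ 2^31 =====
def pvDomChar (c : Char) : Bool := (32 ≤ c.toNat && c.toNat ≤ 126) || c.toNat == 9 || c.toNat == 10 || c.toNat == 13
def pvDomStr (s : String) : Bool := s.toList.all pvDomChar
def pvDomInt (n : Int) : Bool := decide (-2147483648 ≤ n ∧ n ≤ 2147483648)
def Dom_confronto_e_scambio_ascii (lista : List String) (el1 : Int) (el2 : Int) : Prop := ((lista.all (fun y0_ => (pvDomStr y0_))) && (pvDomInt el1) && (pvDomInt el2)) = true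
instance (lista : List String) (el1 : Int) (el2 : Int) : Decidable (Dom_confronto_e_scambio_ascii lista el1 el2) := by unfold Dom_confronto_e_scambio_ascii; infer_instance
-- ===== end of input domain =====

-- B replaces A's toggling in-place swaps by a single backward scan with early exit: the
-- decision at the last differing character overwrites all earlier toggles, so B swaps once
-- iff s2 wins there (return value only: both Pythons also mutate `lista` in place alike).


-- ===== PORT A =====
-- loop body of A's `for x in range(max_loops)` (state = the current list)
def pvStepA (el1 el2 : Int) (lst : List String) (x : Int) : List String :=
  let letter := (PySem.Str.pyGet? (PySem.List.pyGetD lst el1 "") x).getD ' '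
  let previous_letter := (PySem.Str.pyGet? (PySem.List.pyGetD lst el2 "") x).getD ' '
  if previous_letter ≠ letter then
    if previous_letter.toNat > letter.toNat then
      let t := PySem.List.pyGetD lst el1 ""
      let lst1 := PySem.List.pySetD lst el1 (PySem.List.pyGetD lst el2 "")
      PySem.List.pySetD lst1 el2 t
    else lst
  else lst

def confronto_e_scambio_ascii (lista : List String) (el1 : Int) (el2 : Int) : List String :=
  let max_loops := min (PySem.Str.len (PySem.List.pyGetD lista el1 ""))
                       (PySem.Str.len (PySem.List.pyGetD lista el2 ""))
  (PySem.List.pyRange 0 max_loops 1).foldl (pvStepA el1 el2) lista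

-- ===== PORT B =====
-- B's backward `for x in range(min-1, -1, -1)` with the early `return` at the first
-- differing character, as structural recursion over the (countdown) index list
def pvScanB (s1 s2 : String) (lista : List String) (el1 el2 : Int) : List Int → List String
  | [] => lista
  | x :: rest =>
      if (PySem.Str.pyGet? s1 x).getD ' ' ≠ (PySem.Str.pyGet? s2 x).getD ' ' then
        if ((PySem.Str.pyGet? s2 x).getD ' ').toNat > ((PySem.Str.pyGet? s1 x).getD ' ').toNat then
          PySem.List.pySetD (PySem.List.pySetD lista el1 s2) el2 s1
        else lista
      else pvScanB s1 s2 lista el1 el2 rest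

def confronto_e_scambio_ascii_alt (lista : List String) (el1 : Int) (el2 : Int) : List String :=
  let s1 := PySem.List.pyGetD lista el1 ""
  let s2 := PySem.List.pyGetD lista el2 ""
  pvScanB s1 s2 lista el1 el2
    (PySem.List.pyRange (min (PySem.Str.len s1) (PySem.Str.len s2) - 1) (-1) (-1))

-- ===== PRECONDITION & SPEC =====
-- Pre_ excludes exactly the inputs where Python A raises IndexError: el1 or el2 out of range of lista.
def Pre_confronto_e_scambio_ascii (lista : List String) (el1 : Int) (el2 : Int) : Prop :=
  PySem.Raise.InRange lista.length el1 ∧ PySem.Raise.InRange lista.length el2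
instance (lista : List String) (el1 : Int) (el2 : Int) : Decidable (Pre_confronto_e_scambio_ascii lista el1 el2) := by unfold Pre_confronto_e_scambio_ascii; infer_instance

def pvWitness_confronto_e_scambio_ascii : List String × Int × Int := (["ba", "ab", "zz"], 0, 1)

def Spec_confronto_e_scambio_ascii (lista : List String) (el1 : Int) (el2 : Int) (out : List String) : Prop := out = confronto_e_scambio_ascii_alt lista el1 el2
instance (lista : List String) (el1 : Int) (el2 : Int) (out : List String) : Decidable (Spec_confronto_e_scambio_ascii lista el1 el2 out) := by unfold Spec_confronto_e_scambio_ascii; infer_instance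

-- ===== CLAIM (what is proved, stated in full; the proofs are below) =====
def Claim_equal_confronto_e_scambio_ascii : Prop := ∀ (lista : List String) (el1 : Int) (el2 : Int), Dom_confronto_e_scambio_ascii lista el1 el2 → Pre_confronto_e_scambio_ascii lista el1 el2 → Spec_confronto_e_scambio_ascii lista el1 el2 (confronto_e_scambio_ascii lista el1 el2)

-- ===== LEMMAS AND PROOFS =====

-- an in-range Int index resolves to a Nat index, depending only on the length
theorem pvIdx_of_inRange (len : Nat) (i : Int) (h : PySem.Raise.InRange len i) :
    ∃ n, PySem.List.pyIdx? len i = some n ∧ n < len := by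
  obtain ⟨h1, h2⟩ := h
  unfold PySem.List.pyIdx?
  by_cases hp : 0 ≤ i
  · refine ⟨i.toNat, ?_, by omega⟩
    rw [if_pos hp, if_pos (by omega)]
  · refine ⟨len - (-i).toNat, ?_, by omega⟩
    rw [if_neg hp, if_pos (by omega)]

theorem pvGetD_resolve {α : Type} (ys : List α) (i : Int) (d : α) (n : Nat)
    (h : PySem.List.pyIdx? ys.length i = some n) (hn : n < ys.length) :
    PySem.List.pyGetD ys i d = ys[n] := by
  simp [PySem.List.pyGetD, PySem.List.pyGet?, h, List.getElem?_eq_getElem hn]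

theorem pvSetD_resolve {α : Type} (ys : List α) (i : Int) (v : α) (n : Nat)
    (h : PySem.List.pyIdx? ys.length i = some n) :
    PySem.List.pySetD ys i v = ys.set n v := by
  simp [PySem.List.pySetD, PySem.List.pySet?, h]

-- the double swap is the identity
theorem pvSwapSwap {α : Type} (l : List α) (n1 n2 : Nat) (h1 : n1 < l.length) (h2 : n2 < l.length) :
    (((l.set n1 l[n2]).set n2 l[n1]).set n1 l[n1]).set n2 l[n2] = l := by
  apply List.ext_getElem
  · simp
  · intro i hi hi'
    simp only [List.getElem_set]
    split_ifs <;> simp_all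

-- proof-side parity flag: the state of A's loop as a function of a swap-parity boolean
def pvSwState (lista : List String) (n1 n2 : Nat) (flag : Bool) : List String :=
  if flag then (lista.set n1 (lista.getD n2 "")).set n2 (lista.getD n1 "") else lista

theorem pvSwState_length (lista : List String) (n1 n2 : Nat) (flag : Bool) :
    (pvSwState lista n1 n2 flag).length = lista.length := by
  unfold pvSwState; split_ifs <;> simp

def pvStepB (s1 s2 : String) (flag : Bool) (x : Int) : Bool :=
  let cur1 := if flag then s2 else s1
  let cur2 := if flag then s1 else s2
  if (PySem.Str.pyGet? cur2 x).getD ' ' ≠ (PySem.Str.pyGet? cur1 x).getD ' ' ∧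
     ((PySem.Str.pyGet? cur2 x).getD ' ').toNat > ((PySem.Str.pyGet? cur1 x).getD ' ').toNat
  then !flag else flag

-- collapse A's nested if (both else-branches identical) into one conjunction
theorem pvIteIte {p q : Prop} [Decidable p] [Decidable q] {α : Type} (a b : α) :
    (if p then if q then a else b else b) = if p ∧ q then a else b := by
  split_ifs <;> first | rfl | tauto

-- one step of A on the tracked state equals the parity step
theorem pvStep_eq (lista : List String) (el1 el2 : Int) (n1 n2 : Nat)
    (h1 : PySem.List.pyIdx? lista.length el1 = some n1) (hn1 : n1 < lista.length)
    (h2 : PySem.List.pyIdx? lista.length el2 = some n2) (hn2 : n2 < lista.length)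
    (flag : Bool) (x : Int) :
    pvStepA el1 el2 (pvSwState lista n1 n2 flag) x =
      pvSwState lista n1 n2 (pvStepB (lista[n1]) (lista[n2]) flag x) := by
  have g1 : lista.getD n1 "" = lista[n1] := List.getD_eq_getElem lista "" hn1
  have g2 : lista.getD n2 "" = lista[n2] := List.getD_eq_getElem lista "" hn2
  have h1' : PySem.List.pyIdx? (pvSwState lista n1 n2 flag).length el1 = some n1 := by
    rw [pvSwState_length]; exact h1
  have hr1 : PySem.List.pyGetD (pvSwState lista n1 n2 flag) el1 "" =
      (if flag then lista[n2] else lista[n1]) := by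
    rw [pvGetD_resolve _ _ _ _ h1' (by rw [pvSwState_length]; exact hn1)]
    rcases flag with _ | _
    · rfl
    · simp only [pvSwState, if_pos]
      by_cases h : n2 = n1
      · subst h; simp [List.getElem?_eq_getElem hn1]
      · simp [h, List.getElem?_eq_getElem hn2]
  have hr2 : PySem.List.pyGetD (pvSwState lista n1 n2 flag) el2 "" =
      (if flag then lista[n1] else lista[n2]) := by
    rw [pvGetD_resolve _ _ _ _ (by rw [pvSwState_length]; exact h2)
        (by rw [pvSwState_length]; exact hn2)]
    rcases flag with _ | _
    · rfl
    · simp [pvSwState, List.getElem?_eq_getElem hn1]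
  unfold pvStepA pvStepB
  simp only [hr1, hr2, pvIteIte, gt_iff_lt]
  rcases flag with _ | _ <;>
    simp only [Bool.false_eq_true, if_false, if_true, Bool.not_false, Bool.not_true] <;>
    split_ifs with hC <;>
    try rfl
  · -- flag = false, condition holds: one physical swap appears
    rw [pvSetD_resolve _ _ _ n1 h1',
        pvSetD_resolve ((pvSwState lista n1 n2 false).set n1 (lista[n2])) el2 (lista[n1]) n2
          (by rw [List.length_set, pvSwState_length]; exact h2)]
    simp only [pvSwState, Bool.false_eq_true, if_false, if_true, g1, g2]
  · -- flag = true, condition holds: the second swap undoes the first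
    rw [pvSetD_resolve _ _ _ n1 h1',
        pvSetD_resolve ((pvSwState lista n1 n2 true).set n1 (lista[n1])) el2 (lista[n2]) n2
          (by rw [List.length_set, pvSwState_length]; exact h2)]
    simp only [pvSwState, Bool.false_eq_true, if_false, if_true, g1, g2]
    exact pvSwapSwap lista n1 n2 hn1 hn2

-- A's whole loop equals the parity loop, through pvSwState
theorem pvLoop_eq (lista : List String) (el1 el2 : Int) (n1 n2 : Nat)
    (h1 : PySem.List.pyIdx? lista.length el1 = some n1) (hn1 : n1 < lista.length)
    (h2 : PySem.List.pyIdx? lista.length el2 = some n2) (hn2 : n2 < lista.length)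
    (xs : List Int) : ∀ flag : Bool,
    xs.foldl (pvStepA el1 el2) (pvSwState lista n1 n2 flag) =
      pvSwState lista n1 n2 (xs.foldl (pvStepB (lista[n1]) (lista[n2])) flag) := by
  induction xs with
  | nil => intro flag; rfl
  | cons x xs ih =>
      intro flag
      simp only [List.foldl_cons, pvStep_eq lista el1 el2 n1 n2 h1 hn1 h2 hn2 flag x]
      exact ih _

-- distinct chars have distinct codes
theorem pvCharNe {a b : Char} (h : a ≠ b) : a.toNat ≠ b.toNat :=
  fun hc => h (Char.ext (UInt32.toNat_inj.mp hc))

-- the parity step overwrites: at a differing position the new flag is s2[x] > s1[x],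
-- independent of the old flag
theorem pvStepB_char (s1 s2 : String) (flag : Bool) (x : Int) :
    pvStepB s1 s2 flag x =
      (if (PySem.Str.pyGet? s1 x).getD ' ' ≠ (PySem.Str.pyGet? s2 x).getD ' '
       then decide (((PySem.Str.pyGet? s2 x).getD ' ').toNat > ((PySem.Str.pyGet? s1 x).getD ' ').toNat)
       else flag) := by
  unfold pvStepB
  simp only [PySem.Str.pyGet?]
  rcases flag with _ | _ <;>
    simp only [Bool.false_eq_true, if_false, if_true, Bool.not_false, Bool.not_true]
  · by_cases hab : (PySem.Chars.pyGet? s1.toList x).getD ' ' = (PySem.Chars.pyGet? s2.toList x).getD ' '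
    · have hab' : (PySem.List.pyGet? s1.toList x).getD ' ' = (PySem.List.pyGet? s2.toList x).getD ' ' := hab
      simp [hab']
    · by_cases hba : ((PySem.Chars.pyGet? s2.toList x).getD ' ').toNat > ((PySem.Chars.pyGet? s1.toList x).getD ' ').toNat
      · have hba' : ((PySem.List.pyGet? s2.toList x).getD ' ').toNat > ((PySem.List.pyGet? s1.toList x).getD ' ').toNat := hba
        rw [if_pos ⟨fun e => hab e.symm, hba⟩, if_pos hab]; simp [hba']
      · have hba' : ¬((PySem.List.pyGet? s2.toList x).getD ' ').toNat > ((PySem.List.pyGet? s1.toList x).getD ' ').toNat := hba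
        rw [if_neg (fun hc => hba hc.2), if_pos hab]; simp [hba']
  · by_cases hab : (PySem.Chars.pyGet? s1.toList x).getD ' ' = (PySem.Chars.pyGet? s2.toList x).getD ' '
    · have hab' : (PySem.List.pyGet? s1.toList x).getD ' ' = (PySem.List.pyGet? s2.toList x).getD ' ' := hab
      simp [hab']
    · have hne : ((PySem.Chars.pyGet? s1.toList x).getD ' ').toNat ≠ ((PySem.Chars.pyGet? s2.toList x).getD ' ').toNat :=
        pvCharNe hab
      by_cases hba : ((PySem.Chars.pyGet? s2.toList x).getD ' ').toNat > ((PySem.Chars.pyGet? s1.toList x).getD ' ').toNat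
      · have hba' : ((PySem.List.pyGet? s2.toList x).getD ' ').toNat > ((PySem.List.pyGet? s1.toList x).getD ' ').toNat := hba
        rw [if_neg (fun hc => absurd hc.2 (by omega)), if_pos hab]; simp [hba']
      · have hba' : ¬((PySem.List.pyGet? s2.toList x).getD ' ').toNat > ((PySem.List.pyGet? s1.toList x).getD ' ').toNat := hba
        rw [if_pos ⟨hab, by omega⟩, if_pos hab]; simp [hba']

-- the parity fold over xs = the decision at the LAST differing index of xs
theorem pvFoldl_last (s1 s2 : String) (xs : List Int) : ∀ flag : Bool,
    xs.foldl (pvStepB s1 s2) flag =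
      (match xs.reverse.find?
          (fun x => decide ((PySem.Str.pyGet? s1 x).getD ' ' ≠ (PySem.Str.pyGet? s2 x).getD ' ')) with
       | some x => decide (((PySem.Str.pyGet? s2 x).getD ' ').toNat > ((PySem.Str.pyGet? s1 x).getD ' ').toNat)
       | none => flag) := by
  induction xs with
  | nil => intro flag; rfl
  | cons x xs ih =>
      intro flag
      rw [List.foldl_cons, ih, List.reverse_cons, List.find?_append]
      cases hf : xs.reverse.find?
          (fun x => decide ((PySem.Str.pyGet? s1 x).getD ' ' ≠ (PySem.Str.pyGet? s2 x).getD ' ')) with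
      | some y => rfl
      | none =>
          rw [pvStepB_char]
          by_cases h : (PySem.List.pyGet? s1.toList x).getD ' ' = (PySem.List.pyGet? s2.toList x).getD ' '
          · simp [PySem.Str.pyGet?, h]
          · simp [PySem.Str.pyGet?, h]

-- B's early-exit scan = the decision at the FIRST differing index of its list
theorem pvScan_find (s1 s2 : String) (lista : List String) (el1 el2 : Int) (ys : List Int) :
    pvScanB s1 s2 lista el1 el2 ys =
      (match ys.find?
          (fun x => decide ((PySem.Str.pyGet? s1 x).getD ' ' ≠ (PySem.Str.pyGet? s2 x).getD ' ')) with
       | some x =>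
          if ((PySem.Str.pyGet? s2 x).getD ' ').toNat > ((PySem.Str.pyGet? s1 x).getD ' ').toNat
          then PySem.List.pySetD (PySem.List.pySetD lista el1 s2) el2 s1 else lista
       | none => lista) := by
  induction ys with
  | nil => rfl
  | cons x rest ih =>
      by_cases h : (PySem.List.pyGet? s1.toList x).getD ' ' = (PySem.List.pyGet? s2.toList x).getD ' '
      · simp [pvScanB, PySem.Str.pyGet?, h, ih]
      · simp [pvScanB, PySem.Str.pyGet?, h]

-- ===== VERDICT (by name: the statement is the Claim_ definition above) =====
theorem confronto_e_scambio_ascii_spec : Claim_equal_confronto_e_scambio_ascii := by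
  intro lista el1 el2 _ hpre
  obtain ⟨hin1, hin2⟩ := hpre
  obtain ⟨n1, h1, hn1⟩ := pvIdx_of_inRange _ _ hin1
  obtain ⟨n2, h2, hn2⟩ := pvIdx_of_inRange _ _ hin2
  have g1 : lista.getD n1 "" = lista[n1] := List.getD_eq_getElem lista "" hn1
  have g2 : lista.getD n2 "" = lista[n2] := List.getD_eq_getElem lista "" hn2
  unfold Spec_confronto_e_scambio_ascii confronto_e_scambio_ascii confronto_e_scambio_ascii_alt
  simp only [pvGetD_resolve _ _ _ _ h1 hn1, pvGetD_resolve _ _ _ _ h2 hn2]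
  set m := min (PySem.Str.len lista[n1]) (PySem.Str.len lista[n2]) with hm
  have hl := pvLoop_eq lista el1 el2 n1 n2 h1 hn1 h2 hn2 (PySem.List.pyRange 0 m 1) false
  have h0 : pvSwState lista n1 n2 false = lista := rfl
  rw [h0] at hl
  rw [hl, pvFoldl_last, pvScan_find]
  have hrev : PySem.List.pyRange (m - 1) (-1) (-1) = (PySem.List.pyRange 0 m 1).reverse := by
    rw [PySem.List.pyRange_neg_one_eq_reverse]; norm_num
  rw [hrev]
  cases hf : (PySem.List.pyRange 0 m 1).reverse.find?
      (fun x => decide ((PySem.Str.pyGet? lista[n1] x).getD ' ' ≠ (PySem.Str.pyGet? lista[n2] x).getD ' ')) with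
  | none => rfl
  | some x =>
      by_cases hc : ((PySem.Str.pyGet? lista[n2] x).getD ' ').toNat > ((PySem.Str.pyGet? lista[n1] x).getD ' ').toNat
      · simp only [hc, decide_true]
        simp only [pvSwState, if_pos, g1, g2]
        rw [pvSetD_resolve lista el1 (lista[n2]) n1 h1,
            pvSetD_resolve (lista.set n1 (lista[n2])) el2 (lista[n1]) n2
              (by rw [List.length_set]; exact h2)]
      · simp only [hc, decide_false]
        rfl
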